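-- pv_equiv track=rewrite | github.com/Loic78570/secu_reseau | aux_function.py | pkt_to_json
-- ===== SOURCE A (Python) =====
-- def pkt_to_json(pkt):
--     """
--     Serializes a :param pkt: into easily accessible json format
--     """
--     json_packet = {}
--     c_layer = None
--     for line in pkt.split('\n'):
--         if line.startswith("###["):
--             c_layer = line.replace("###[", '').replace("]###", '').strip().lower()
--         else:
--             keyval = line.split("=")
--             if len(keyval) == 2:
--                 if c_layer not in json_packet:
--                     json_packet[c_layer] = {}
--                 json_packet[c_layer][keyval[0].strip()] = keyval[1].strip()
--     return json_packet
-- ===== SOURCE B (Python) =====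
-- def pkt_to_json(pkt):
--     """
--     Serializes a :param pkt: into easily accessible json format
--     """
--     # Phase 1: split the packet into sections, each tagged with its layer name
--     # (lines before the first header belong to the layer None).
--     sections = []
--     layer, body = None, []
--     for line in pkt.split('\n'):
--         if line.startswith("###["):
--             sections.append((layer, body))
--             layer = line.replace("###[", '').replace("]###", '').strip().lower()
--             body = []
--         else:
--             body.append(line)
--     sections.append((layer, body))
--     # Phase 2: per section, keep the lines with exactly one '=' and merge.
--     json_packet = {}
--     for layer, body in sections:
--         pairs = [p for p in (l.split("=") for l in body) if len(p) == 2]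
--         if pairs:
--             d = json_packet.setdefault(layer, {})
--             for k, v in pairs:
--                 d[k.strip()] = v.strip()
--     return json_packet
-- ===== Notes on version B (the rewrite author's own statement) =====
-- stated objective: alternative
-- what changed: B replaces A's single stateful line loop (current-layer variable mutated while inserting) by a two-phase decomposition: first split the packet into (layer, body-lines) sections, then build the dict per section, merging repeated layers with setdefault.
-- outside the precondition, e.g. on pkt_to_json('x=1'): A returns {None: {'x': '1'}}, B returns {None: {'x': '1'}}; on pkt_to_json('='): A returns {None: {'': ''}}, B returns {None: {'': ''}}
import Mathlib
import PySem

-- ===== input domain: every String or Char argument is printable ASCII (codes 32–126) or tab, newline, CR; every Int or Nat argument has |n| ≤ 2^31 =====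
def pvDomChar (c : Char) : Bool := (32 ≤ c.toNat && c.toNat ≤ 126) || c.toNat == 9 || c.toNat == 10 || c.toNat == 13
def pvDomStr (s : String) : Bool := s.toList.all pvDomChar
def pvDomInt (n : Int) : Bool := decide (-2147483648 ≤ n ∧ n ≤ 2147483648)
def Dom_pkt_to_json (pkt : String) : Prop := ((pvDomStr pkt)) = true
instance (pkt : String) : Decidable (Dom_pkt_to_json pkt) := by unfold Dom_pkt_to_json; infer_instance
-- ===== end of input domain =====

-- B re-decomposes A's single stateful line loop into two phases (split into (layer, body) sections, then
-- build the dict per section with setdefault); same cost, different structure ("alternative").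

-- ===== PORT A =====
-- the body of A's `for line in pkt.split('\n')` loop; state = (json_packet, c_layer)
def pktAStep (st : PySem.Dict String (PySem.Dict String String) × Option String) (line : String) :
    PySem.Dict String (PySem.Dict String String) × Option String :=
  if PySem.Str.startswith line "###[" then
    (st.1, some (PySem.Str.lower (PySem.Str.strip
      (PySem.Str.replace (PySem.Str.replace line "###[" "") "]###" ""))))
  else
    match (PySem.Str.split? line "=").getD [], st.2 with   -- sep "=" ≠ "", so split? is always some
    | [k, v], some l =>
        -- if c_layer not in json_packet: json_packet[c_layer] = {}
        let jp := if st.1.contains l then st.1 else st.1.insert l PySem.Dict.empty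
        -- json_packet[c_layer][keyval[0].strip()] = keyval[1].strip()
        (jp.insert l ((jp.getD l PySem.Dict.empty).insert (PySem.Str.strip k) (PySem.Str.strip v)), st.2)
    | [_, _], none => st   -- Python keys this entry by None: not representable in the result type; excluded by Pre_
    | _, _ => st

def pkt_to_json (pkt : String) : List (String × List (String × String)) :=
  ((((PySem.Str.split? pkt "\n").getD []).foldl pktAStep (PySem.Dict.empty, none)).1).items.map
    (fun p => (p.1, p.2.items))

-- ===== PORT B =====
def pktLayerName (line : String) : String :=
  PySem.Str.lower (PySem.Str.strip
    (PySem.Str.replace (PySem.Str.replace line "###[" "") "]###" ""))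

-- phase-1 loop body; state = (sections, layer, body)
def pktBSplitStep (st : List (Option String × List String) × Option String × List String)
    (line : String) : List (Option String × List String) × Option String × List String :=
  if PySem.Str.startswith line "###[" then
    (st.1 ++ [(st.2.1, st.2.2)], some (pktLayerName line), [])
  else
    (st.1, st.2.1, st.2.2 ++ [line])

def pktParse (line : String) : Option (String × String) :=
  match (PySem.Str.split? line "=").getD [] with   -- sep "=" ≠ "", so split? is always some
  | [k, v] => some (k, v)
  | _ => none

-- the `pairs` comprehension of Source B
def pktPairs (body : List String) : List (String × String) := body.filterMap pktParse

-- phase-2 loop body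
def pktBInsert (jp : PySem.Dict String (PySem.Dict String String))
    (sec : Option String × List String) : PySem.Dict String (PySem.Dict String String) :=
  match pktPairs sec.2, sec.1 with
  | [], _ => jp
  | _, none => jp   -- a None layer with pairs is not representable in the result type; excluded by Pre_
  | ps, some l =>
      let jp1 := jp.setdefault l PySem.Dict.empty   -- d = json_packet.setdefault(layer, {})
      jp1.insert l (ps.foldl
        (fun d p => d.insert (PySem.Str.strip p.1) (PySem.Str.strip p.2))
        (jp1.getD l PySem.Dict.empty))

def pkt_to_json_alt (pkt : String) : List (String × List (String × String)) :=
  let fin := ((PySem.Str.split? pkt "\n").getD []).foldl pktBSplitStep ([], none, [])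
  let sections := fin.1 ++ [(fin.2.1, fin.2.2)]
  (sections.foldl pktBInsert PySem.Dict.empty).items.map (fun p => (p.1, p.2.items))

-- ===== PRECONDITION & SPEC =====
-- Pre_ excludes packets that have a line with exactly one '=' before the first header line:
-- there Python A returns a dict keyed by None, which is not a value of the declared result type
-- List (String × List (String × String)).
def Pre_pkt_to_json (pkt : String) : Prop :=
  ∀ line ∈ ((PySem.Str.split? pkt "\n").getD []).takeWhile
      (fun l => !(PySem.Str.startswith l "###[")),
    ((PySem.Str.split? line "=").getD []).length ≠ 2
instance (pkt : String) : Decidable (Pre_pkt_to_json pkt) := by unfold Pre_pkt_to_json; infer_instance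

def pvWitness_pkt_to_json : String := "###[ IP ]###\nsrc = 1\ndst = 2\n###[ TCP ]###\nflags = S"

def Spec_pkt_to_json (pkt : String) (out : List (String × List (String × String))) : Prop := out = pkt_to_json_alt pkt
instance (pkt : String) (out : List (String × List (String × String))) : Decidable (Spec_pkt_to_json pkt out) := by unfold Spec_pkt_to_json; infer_instance

-- ===== CLAIM (what is proved, stated in full; the proofs are below) =====
def Claim_equal_pkt_to_json : Prop := ∀ (pkt : String), Dom_pkt_to_json pkt → Pre_pkt_to_json pkt → Spec_pkt_to_json pkt (pkt_to_json pkt)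

-- ===== LEMMAS AND PROOFS =====

-- the section decomposition, as a pure recursion over the lines
def pktSecs (cl : Option String) (body : List String) :
    List String → List (Option String × List String)
  | [] => [(cl, body)]
  | line :: rest =>
      if PySem.Str.startswith line "###[" then
        (cl, body) :: pktSecs (some (pktLayerName line)) [] rest
      else
        pktSecs cl (body ++ [line]) rest

theorem pktPhase1_eq (lines : List String) (acc : List (Option String × List String))
    (cl : Option String) (body : List String) :
    (lines.foldl pktBSplitStep (acc, cl, body)).1
      ++ [((lines.foldl pktBSplitStep (acc, cl, body)).2.1,
           (lines.foldl pktBSplitStep (acc, cl, body)).2.2)]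
      = acc ++ pktSecs cl body lines := by
  induction lines generalizing acc cl body with
  | nil => simp [pktSecs]
  | cons line rest ih =>
      by_cases h : PySem.Str.startswith line "###[" = true
      · have h' : PySem.Chars.startswith line.toList ['#', '#', '#', '['] = true := by simpa using h
        simp [List.foldl_cons, pktBSplitStep, h', pktSecs, ih]
      · have h' : PySem.Chars.startswith line.toList ['#', '#', '#', '['] = false := by simpa using h
        simp [List.foldl_cons, pktBSplitStep, h', pktSecs, ih]

-- A's per-pair dictionary update, simplified
def pktUpd (jp : PySem.Dict String (PySem.Dict String String)) (l k v : String) :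
    PySem.Dict String (PySem.Dict String String) :=
  jp.insert l ((jp.getD l PySem.Dict.empty).insert k v)

theorem pktAStep_header {line : String} (h : PySem.Str.startswith line "###[" = true)
    (st : PySem.Dict String (PySem.Dict String String) × Option String) :
    pktAStep st line = (st.1, some (pktLayerName line)) := by
  have h' : PySem.Chars.startswith line.toList ['#', '#', '#', '['] = true := by simpa using h
  simp [pktAStep, h', pktLayerName]

theorem pktAStep_kv {line k v : String} (h : PySem.Str.startswith line "###[" = false)
    (hp : pktParse line = some (k, v))
    (jp : PySem.Dict String (PySem.Dict String String)) (l : String) :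
    pktAStep (jp, some l) line = (pktUpd jp l (PySem.Str.strip k) (PySem.Str.strip v), some l) := by
  unfold pktParse at hp
  unfold pktAStep pktUpd
  simp only [h, Bool.false_eq_true, if_false]
  rcases hs : (PySem.Str.split? line "=").getD [] with _ | ⟨a, _ | ⟨b, _ | _⟩⟩ <;>
    rw [hs] at hp <;> simp_all
  by_cases hc : jp.contains l = true
  · simp [hc]
  · simp only [Bool.not_eq_true] at hc
    simp [hc, PySem.Dict.getD_insert_self, PySem.Dict.insert_insert_self,
      PySem.Dict.getD_of_not_contains jp _ hc]

theorem pktAStep_skip {line : String} (h : PySem.Str.startswith line "###[" = false)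
    (hp : pktParse line = none)
    (st : PySem.Dict String (PySem.Dict String String) × Option String) :
    pktAStep st line = st := by
  unfold pktParse at hp
  unfold pktAStep
  simp only [h, Bool.false_eq_true, if_false]
  rcases hs : (PySem.Str.split? line "=").getD [] with _ | ⟨a, _ | ⟨b, _ | _⟩⟩
  · rfl
  · rfl
  · rw [hs] at hp; simp_all
  · rfl

theorem pktAStep_none {line : String} (h : PySem.Str.startswith line "###[" = false)
    (jp : PySem.Dict String (PySem.Dict String String)) :
    pktAStep (jp, none) line = (jp, none) := by
  unfold pktAStep
  simp only [h, Bool.false_eq_true, if_false]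
  rcases (PySem.Str.split? line "=").getD [] with _ | ⟨a, _ | ⟨b, _ | _⟩⟩ <;> rfl

-- A's cumulative effect of a section body under layer l
def pktBumps (jp : PySem.Dict String (PySem.Dict String String)) (l : String)
    (ps : List (String × String)) : PySem.Dict String (PySem.Dict String String) :=
  ps.foldl (fun jp p => pktUpd jp l (PySem.Str.strip p.1) (PySem.Str.strip p.2)) jp

theorem pktBumps_eq_insert (jp : PySem.Dict String (PySem.Dict String String)) (l : String)
    (ps : List (String × String)) (hne : ps ≠ []) :
    pktBumps jp l ps
      = jp.insert l (ps.foldl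
          (fun d p => d.insert (PySem.Str.strip p.1) (PySem.Str.strip p.2))
          (jp.getD l PySem.Dict.empty)) := by
  induction ps generalizing jp with
  | nil => exact absurd rfl hne
  | cons p ps ih =>
      rcases ps with _ | ⟨q, ps⟩
      · simp [pktBumps, pktUpd]
      · have := ih (jp := pktUpd jp l (PySem.Str.strip p.1) (PySem.Str.strip p.2)) (by simp)
        simp only [pktBumps, List.foldl_cons] at this ⊢
        rw [this]
        simp [pktUpd, PySem.Dict.getD_insert_self, PySem.Dict.insert_insert_self]

theorem pktBInsert_none (jp : PySem.Dict String (PySem.Dict String String)) (body : List String) :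
    pktBInsert jp (none, body) = jp := by
  unfold pktBInsert
  rcases pktPairs body with _ | ⟨p, ps⟩ <;> rfl

theorem pktBInsert_some (jp : PySem.Dict String (PySem.Dict String String)) (l : String)
    (body : List String) : pktBInsert jp (some l, body) = pktBumps jp l (pktPairs body) := by
  unfold pktBInsert
  rcases h : pktPairs body with _ | ⟨p, ps⟩
  · simp [pktBumps]
  · rw [pktBumps_eq_insert _ _ _ (by simp)]
    by_cases hc : jp.contains l = true
    · simp [PySem.Dict.setdefault_of_contains _ _ hc]
    · simp only [Bool.not_eq_true] at hc
      simp [PySem.Dict.setdefault_of_not_contains _ _ hc,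
        PySem.Dict.getD_insert_self, PySem.Dict.insert_insert_self,
        PySem.Dict.getD_of_not_contains jp _ hc]

theorem pktMain (lines : List String) (l : String) (body : List String)
    (jp : PySem.Dict String (PySem.Dict String String)) :
    (lines.foldl pktAStep (pktBumps jp l (pktPairs body), some l)).1
      = (pktSecs (some l) body lines).foldl pktBInsert jp := by
  induction lines generalizing l body jp with
  | nil => simp [pktSecs, pktBInsert_some]
  | cons line rest ih =>
      by_cases h : PySem.Str.startswith line "###[" = true
      · have h' : PySem.Chars.startswith line.toList ['#', '#', '#', '['] = true := by simpa using h
        rw [List.foldl_cons, pktAStep_header h]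
        have h0 : pktBumps jp l (pktPairs body) = pktBInsert jp (some l, body) :=
          (pktBInsert_some jp l body).symm
        have h1 : pktBumps jp l (pktPairs body)
            = pktBumps (pktBInsert jp (some l, body)) (pktLayerName line) (pktPairs []) := by
          rw [h0]; simp [pktPairs, pktBumps]
        rw [h1, ih]
        simp [pktSecs, h']
      · simp only [Bool.not_eq_true] at h
        have h' : PySem.Chars.startswith line.toList ['#', '#', '#', '['] = false := by simpa using h
        rcases hp : pktParse line with _ | ⟨k, v⟩
        · rw [List.foldl_cons, pktAStep_skip h hp]
          have hpair : pktPairs (body ++ [line]) = pktPairs body := by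
            simp [pktPairs, hp]
          rw [show pktBumps jp l (pktPairs body)
                = pktBumps jp l (pktPairs (body ++ [line])) by rw [hpair], ih]
          simp [pktSecs, h']
        · rw [List.foldl_cons, pktAStep_kv h hp]
          have hpair : pktPairs (body ++ [line]) = pktPairs body ++ [(k, v)] := by
            simp [pktPairs, hp]
          have hb : pktUpd (pktBumps jp l (pktPairs body)) l
                (PySem.Str.strip k) (PySem.Str.strip v)
              = pktBumps jp l (pktPairs (body ++ [line])) := by
            rw [hpair]; simp [pktBumps]
          rw [hb, ih]
          simp [pktSecs, h']

theorem pktMain0 (lines : List String) (body : List String)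
    (jp : PySem.Dict String (PySem.Dict String String)) :
    (lines.foldl pktAStep (jp, none)).1
      = (pktSecs none body lines).foldl pktBInsert jp := by
  induction lines generalizing body jp with
  | nil => simp [pktSecs, pktBInsert_none]
  | cons line rest ih =>
      by_cases h : PySem.Str.startswith line "###[" = true
      · have h' : PySem.Chars.startswith line.toList ['#', '#', '#', '['] = true := by simpa using h
        rw [List.foldl_cons, pktAStep_header h]
        have h1 : jp = pktBumps jp (pktLayerName line) (pktPairs []) := by
          simp [pktPairs, pktBumps]
        rw [show ((jp, some (pktLayerName line)) :
              PySem.Dict String (PySem.Dict String String) × Option String)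
            = (pktBumps jp (pktLayerName line) (pktPairs []), some (pktLayerName line)) by
            rw [← h1], pktMain]
        simp [pktSecs, h', pktBInsert_none]
      · simp only [Bool.not_eq_true] at h
        have h' : PySem.Chars.startswith line.toList ['#', '#', '#', '['] = false := by simpa using h
        rw [List.foldl_cons, pktAStep_none h, ih (body ++ [line])]
        simp [pktSecs, h']

-- ===== VERDICT (by name: the statement is the Claim_ definition above) =====
theorem pkt_to_json_spec : Claim_equal_pkt_to_json := by
  intro pkt _hdom _hpre
  unfold Spec_pkt_to_json pkt_to_json pkt_to_json_alt
  dsimp only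
  rw [pktMain0 _ [] PySem.Dict.empty]
  have := pktPhase1_eq ((PySem.Str.split? pkt "\n").getD []) [] none []
  simp only [List.nil_append] at this
  rw [this]
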